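-- pv_equiv track=rewrite | github.com/aabarbosa/Python | .py/164.py | constroi_matriz
-- ===== SOURCE A (Python) =====
-- def constroi_matriz(lin, col, list_values):
-- 	'''
-- 	Constrói e retorna uma matriz de dimensões 'lin' por 'col'
-- 	através dos valores fornecidos.
--
-- 	'''
--
-- 	assert len(list_values) == lin * col, 'Dados inválidos'
--
-- 	M_model = [col*[0] for i in range(lin)]
--
-- 	indice = 0
-- 	for i in range(len(M_model)):
-- 		for j in range(len(M_model[0])):
-- 			M_model[i][j] = list_values[indice]
-- 			indice += 1
--
-- 	return M_model
-- ===== SOURCE B (Python) =====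
-- def constroi_matriz(lin, col, list_values):
--     '''
--     Constrói e retorna uma matriz de dimensões 'lin' por 'col'
--     através dos valores fornecidos.
--     '''
--     assert len(list_values) == lin * col, 'Dados inválidos'
--     return [list_values[i*col:(i+1)*col] for i in range(lin)]
-- ===== Notes on version B (the rewrite author's own statement) =====
-- stated objective: simpler
-- what changed: Replaces the preallocated zero matrix plus nested per-cell write loop with a running index by a single row comprehension that carves each row out of the flat list as one contiguous slice.
import Mathlib
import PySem

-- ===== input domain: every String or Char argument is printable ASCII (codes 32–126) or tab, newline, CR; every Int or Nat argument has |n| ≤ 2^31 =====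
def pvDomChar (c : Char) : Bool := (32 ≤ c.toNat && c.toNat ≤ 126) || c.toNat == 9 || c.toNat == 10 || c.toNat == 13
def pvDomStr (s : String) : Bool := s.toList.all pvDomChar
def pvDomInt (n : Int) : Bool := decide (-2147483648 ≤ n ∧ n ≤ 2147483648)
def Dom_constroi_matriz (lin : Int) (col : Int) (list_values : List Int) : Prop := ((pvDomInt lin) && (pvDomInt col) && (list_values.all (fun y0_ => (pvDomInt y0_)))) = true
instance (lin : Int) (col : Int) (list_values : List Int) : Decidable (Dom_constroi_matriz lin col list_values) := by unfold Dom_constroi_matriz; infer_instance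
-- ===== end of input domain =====

-- B builds each row as one contiguous slice of the flat list instead of A's nested
-- per-cell writes into a preallocated zero matrix with a running index.

-- ===== PORT A =====
-- inner loop body: M_model[i][j] = list_values[indice]; indice += 1
def pvInnerA (lv : List Int) (i : Nat) (st : List (List Int) × Nat) (j : Nat) : List (List Int) × Nat :=
  (st.1.set i ((st.1.getD i []).set j (PySem.List.pyGetD lv (st.2 : Int) 0)), st.2 + 1)

-- outer loop body: for j in range(len(M_model[0])): …
def pvOuterA (lv : List Int) (st : List (List Int) × Nat) (i : Nat) : List (List Int) × Nat :=
  (List.range (st.1.headD []).length).foldl (pvInnerA lv i) st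

-- M_model = [col*[0] for i in range(lin)]; indice = 0; for i in range(len(M_model)): …
def constroi_matriz (lin : Int) (col : Int) (list_values : List Int) : List (List Int) :=
  ((List.range ((PySem.List.pyRange 0 lin 1).map (fun _ => List.replicate col.toNat 0)).length).foldl
      (pvOuterA list_values)
      ((PySem.List.pyRange 0 lin 1).map (fun _ => List.replicate col.toNat 0), 0)).1

-- ===== PORT B =====
def constroi_matriz_alt (lin : Int) (col : Int) (list_values : List Int) : List (List Int) :=
  (PySem.List.pyRange 0 lin 1).map
    (fun i => PySem.List.slice list_values (some (i * col)) (some ((i + 1) * col)))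

-- ===== PRECONDITION & SPEC =====
-- Pre_ excludes exactly the inputs on which A's assert fails (AssertionError).
def Pre_constroi_matriz (lin : Int) (col : Int) (list_values : List Int) : Prop :=
  (list_values.length : Int) = lin * col
instance (lin : Int) (col : Int) (list_values : List Int) : Decidable (Pre_constroi_matriz lin col list_values) := by unfold Pre_constroi_matriz; infer_instance

def pvWitness_constroi_matriz : Int × Int × List Int := (2, 3, [1, 2, 3, 4, 5, 6])

def Spec_constroi_matriz (lin : Int) (col : Int) (list_values : List Int) (out : List (List Int)) : Prop := out = constroi_matriz_alt lin col list_values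
instance (lin : Int) (col : Int) (list_values : List Int) (out : List (List Int)) : Decidable (Spec_constroi_matriz lin col list_values out) := by unfold Spec_constroi_matriz; infer_instance

-- ===== CLAIM (what is proved, stated in full; the proofs are below) =====
def Claim_equal_constroi_matriz : Prop := ∀ (lin : Int) (col : Int) (list_values : List Int), Dom_constroi_matriz lin col list_values → Pre_constroi_matriz lin col list_values → Spec_constroi_matriz lin col list_values (constroi_matriz lin col list_values)

-- ===== LEMMAS AND PROOFS =====

-- the row segment A writes starting at flat index k is a slice, once k + c ≤ lv.length
lemma pv_seg_eq (lv : List Int) (k c : Nat) (h : k + c ≤ lv.length) :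
    (List.range c).map (fun j => lv.getD (k + j) 0) = (lv.drop k).take c := by
  apply List.ext_getElem
  · rw [List.length_map, List.length_range, List.length_take, List.length_drop]; omega
  · intro n h1 h2
    simp only [List.getElem_map, List.getElem_range, List.getElem_take, List.getElem_drop]
    rw [List.getD_eq_getElem _ _ (by simp at h1 ⊢; omega)]

-- the inner loop writes cells 0..m-1 of row i from flat positions k, k+1, …
lemma pv_inner_fold (lv : List Int) (i : Nat) (M : List (List Int)) (hi : i < M.length)
    (k : Nat) : ∀ (m : Nat), m ≤ (M.getD i []).length →
    (List.range m).foldl (pvInnerA lv i) (M, k)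
      = (M.set i (((List.range m).map (fun j => lv.getD (k + j) 0)) ++ (M.getD i []).drop m), k + m) := by
  intro m
  induction m with
  | zero =>
    intro _
    simp only [List.range_zero, List.foldl_nil, List.map_nil, List.nil_append, List.drop_zero,
      Nat.add_zero]
    rw [List.getD_eq_getElem _ _ (by simpa using hi), List.set_getElem_self]
  | succ m ih =>
    intro hm
    rw [List.range_succ, List.foldl_append, ih (by omega)]
    have hlen : ((List.range m).map (fun j => lv.getD (k + j) 0)).length = m := by simp
    simp only [List.foldl_cons, List.foldl_nil, pvInnerA, Prod.mk.injEq]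
    refine ⟨?_, by omega⟩
    have hget : (M.set i ((List.range m).map (fun j => lv.getD (k + j) 0)
          ++ (M.getD i []).drop m)).getD i []
        = (List.range m).map (fun j => lv.getD (k + j) 0) ++ (M.getD i []).drop m := by
      rw [List.getD_eq_getElem _ _ (by simpa using hi), List.getElem_set_self]
    rw [hget, List.set_set]
    rw [List.drop_eq_getElem_cons (show m < (M.getD i []).length by omega)]
    rw [List.set_append_right _ _ (le_of_eq hlen)]
    simp only [hlen, Nat.sub_self, List.set_cons_zero, PySem.List.pyGetD_natCast,
      List.map_append, List.map_cons, List.map_nil, List.append_assoc, List.cons_append,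
      List.nil_append]

-- the outer loop, given the rows already done and the untouched zero rows ahead
lemma pv_outer_fold (lv : List Int) (c : Nat) :
    ∀ (n s : Nat) (done : List (List Int)),
    done.length = s →
    (∀ row ∈ done, row.length = c) →
    (s + n) * c ≤ lv.length →
    (List.range' s n).foldl (pvOuterA lv) (done ++ List.replicate n (List.replicate c 0), s * c)
      = (done ++ (List.range' s n).map (fun t => (lv.drop (t * c)).take c), (s + n) * c) := by
  intro n
  induction n with
  | zero => intro s done hs _ _; simp
  | succ n ih =>
    intro s done hs hdone hlen
    have hc1 : (s + 1) * c ≤ lv.length :=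
      le_trans (Nat.mul_le_mul_right _ (by omega)) hlen
    have hseg : s * c + c ≤ lv.length := by rw [Nat.succ_mul] at hc1; exact hc1
    rw [List.range'_succ, List.foldl_cons]
    have hM : (done ++ List.replicate (n + 1) (List.replicate c 0)).getD s []
        = List.replicate c (0 : Int) := by
      rw [List.getD_eq_getElem _ _ (by simp; omega)]
      rw [List.getElem_append_right (by omega)]
      simp [hs]
    have hhead : ((done ++ List.replicate (n + 1) (List.replicate c 0)).headD []).length = c := by
      cases done with
      | nil => simp [List.replicate_succ]
      | cons r rest => simpa using hdone r (by simp)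
    have hstep : pvOuterA lv (done ++ List.replicate (n + 1) (List.replicate c 0), s * c) s
        = (done ++ (lv.drop (s * c)).take c :: List.replicate n (List.replicate c 0),
           (s + 1) * c) := by
      unfold pvOuterA
      rw [hhead]
      rw [pv_inner_fold lv s _ (by simp; omega) (s * c) c (by rw [hM]; simp)]
      rw [hM, pv_seg_eq lv (s * c) c hseg]
      simp only [Prod.mk.injEq]
      refine ⟨?_, by ring⟩
      simp only [List.drop_replicate, Nat.sub_self, List.replicate_zero, List.append_nil]
      rw [List.replicate_succ, List.set_append_right _ _ (le_of_eq hs)]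
      simp [hs]
    rw [hstep]
    have hih := ih (s + 1) (done ++ [(lv.drop (s * c)).take c]) (by simp [hs])
      (by intro row hrow
          rcases List.mem_append.1 hrow with h | h
          · exact hdone row h
          · simp only [List.mem_singleton] at h
            subst h
            simp
            omega)
      (by rw [show s + 1 + n = s + (n + 1) from by omega]; exact hlen)
    simp only [List.append_assoc, List.cons_append, List.nil_append] at hih
    rw [hih]
    simp only [List.map_cons, Prod.mk.injEq]
    exact ⟨trivial, by ring⟩

theorem constroi_matriz_spec : Claim_equal_constroi_matriz := by
  intro lin col lv _ hpre
  unfold Spec_constroi_matriz Pre_constroi_matriz at *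
  unfold constroi_matriz constroi_matriz_alt
  by_cases hl : lin ≤ 0
  · rw [PySem.List.pyRange_one_eq_nil hl]
    simp
  · replace hl : 0 < lin := by omega
    have hc : 0 ≤ col := by nlinarith [lv.length.cast_nonneg (α := Int)]
    set r := lin.toNat with hr
    set c := col.toNat with hcn
    have hlin : lin = (r : Int) := by omega
    have hcol : col = (c : Int) := by omega
    have hlvlen : lv.length = r * c := by
      have h2 : (lv.length : Int) = (r : Int) * (c : Int) := by rw [← hlin, ← hcol]; exact hpre
      exact_mod_cast h2
    have hpr : PySem.List.pyRange 0 lin 1 = (List.range r).map (fun k : Nat => (k : Int)) := by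
      apply List.ext_getElem
      · rw [PySem.List.length_pyRange_one, List.length_map, List.length_range]; omega
      · intro n h1 h2
        rw [PySem.List.getElem_pyRange_one]
        simp only [List.getElem_map, List.getElem_range, zero_add]
    rw [hpr]
    have hM0 : List.map (fun _ => List.replicate c (0 : Int))
        ((List.range r).map (fun k : Nat => (k : Int))) = List.replicate r (List.replicate c 0) := by
      rw [List.map_map]
      rw [show ((fun _ => List.replicate c (0 : Int)) ∘ (fun k : Nat => (k : Int)))
          = (fun _ : Nat => List.replicate c (0 : Int)) from rfl]
      simp [List.map_const']
    simp only [List.length_map, List.length_range]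
    rw [hM0]
    have hout := pv_outer_fold lv c r 0 [] rfl (by simp) (by simp [hlvlen])
    simp only [List.nil_append, Nat.zero_add, Nat.zero_mul] at hout
    rw [List.range_eq_range', hout]
    dsimp only
    rw [List.map_map, ← List.range_eq_range']
    apply List.map_congr_left
    intro k hk
    simp only [Function.comp]
    rw [hcol]
    rw [show ((k : Int)) * ((c : Nat) : Int) = ((k * c : Nat) : Int) from by push_cast; ring]
    rw [show ((k : Int) + 1) * ((c : Nat) : Int) = ((k * c : Nat) : Int) + ((c : Nat) : Int) from by
      push_cast; ring]
    exact (PySem.List.slice_natCast_add lv (k * c) c).symm
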